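-- pv_equiv track=rewrite | github.com/MrBrantCode/unitest_baseline | mut_generate/mist_train_cf/cf_86574/solution.py | sum_of_odd_numbers
-- ===== SOURCE A (Python) =====
-- def sum_of_odd_numbers(n):
--     total_sum = 0
--     count_divisible = 0
--
--     for i in range(1, 2*n + 1, 2):
--         if i % 3 == 0 and i % 5 == 0:
--             count_divisible += 1
--         else:
--             total_sum += i
--
--     return total_sum % (10**9 + 7)
-- ===== SOURCE B (Python) =====
-- def sum_of_odd_numbers(n):
--     if n <= 0:
--         return 0
--     # k = number of odd multiples of 15 (15, 45, 75, ...) not exceeding 2n-1;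
--     # their sum is 15*k**2, and the sum of all odd numbers up to 2n-1 is n**2.
--     k = ((2 * n - 1) // 15 + 1) // 2
--     return (n * n - 15 * k * k) % (10 ** 9 + 7)
-- ===== Notes on version B (the rewrite author's own statement) =====
-- stated objective: faster
-- what changed: Replaced the O(n) loop over all odd numbers below 2n by the closed form n^2 - 15*k^2, where k = ((2n-1)//15 + 1)//2 counts the odd multiples of 15 skipped by A.
import Mathlib
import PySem

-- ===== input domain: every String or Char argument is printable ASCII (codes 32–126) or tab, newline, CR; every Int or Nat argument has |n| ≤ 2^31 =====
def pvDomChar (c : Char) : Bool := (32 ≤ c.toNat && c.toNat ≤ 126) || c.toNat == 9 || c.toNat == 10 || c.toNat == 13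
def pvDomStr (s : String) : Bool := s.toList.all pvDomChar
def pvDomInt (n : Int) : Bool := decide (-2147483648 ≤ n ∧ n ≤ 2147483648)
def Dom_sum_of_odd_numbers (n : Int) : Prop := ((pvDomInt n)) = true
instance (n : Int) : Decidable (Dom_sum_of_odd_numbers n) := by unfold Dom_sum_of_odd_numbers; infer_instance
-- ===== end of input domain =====

-- B replaces A's loop over all odd numbers by the closed form n^2 - 15*k^2
-- (k = number of odd multiples of 15 not exceeding 2n-1).

-- ===== PORT A =====
-- loop body of A's for-loop: state (total_sum, count_divisible)
def pvStep (s : Int × Int) (i : Int) : Int × Int :=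
  if PySem.Int.mod i 3 = 0 ∧ PySem.Int.mod i 5 = 0 then (s.1, s.2 + 1) else (s.1 + i, s.2)

def sum_of_odd_numbers (n : Int) : Int :=
  let r := (PySem.List.pyRange 1 (2 * n + 1) 2).foldl pvStep (0, 0)
  PySem.Int.mod r.1 (10 ^ 9 + 7)

-- ===== PORT B =====
def sum_of_odd_numbers_alt (n : Int) : Int :=
  if n ≤ 0 then 0
  else
    let k := PySem.Int.floordiv (PySem.Int.floordiv (2 * n - 1) 15 + 1) 2
    PySem.Int.mod (n * n - 15 * k * k) (10 ^ 9 + 7)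

-- ===== PRECONDITION & SPEC =====
def Spec_sum_of_odd_numbers (n : Int) (out : Int) : Prop := out = sum_of_odd_numbers_alt n
instance (n : Int) (out : Int) : Decidable (Spec_sum_of_odd_numbers n out) := by unfold Spec_sum_of_odd_numbers; infer_instance

-- ===== CLAIM (what is proved, stated in full; the proofs are below) =====
def Claim_equal_sum_of_odd_numbers : Prop := ∀ (n : Int), Dom_sum_of_odd_numbers n → Spec_sum_of_odd_numbers n (sum_of_odd_numbers n)

-- ===== LEMMAS AND PROOFS =====

-- number of odd multiples of 15 among 1, 3, …, 2m-1, as B's floor divisions compute it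
def pvCnt (m : Nat) : Int := ((2 * (m : Int) - 1) / 15 + 1) / 2

lemma pvCond (i : Int) :
    (PySem.Int.mod i 3 = 0 ∧ PySem.Int.mod i 5 = 0) ↔ i % 15 = 0 := by
  rw [PySem.Int.mod_eq_emod_of_pos (by norm_num : (0:Int) < 3),
      PySem.Int.mod_eq_emod_of_pos (by norm_num : (0:Int) < 5)]
  omega

lemma pvCnt_eq (m : Nat) : pvCnt m = ((m : Int) + 7) / 15 := by
  unfold pvCnt; omega

lemma pvLoopKey (m : Nat) :
    List.foldl pvStep (0, 0) ((List.range m).map (fun k : Nat => (1:Int) + 2 * (k:Int)))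
      = ((m : Int) * m - 15 * pvCnt m * pvCnt m, pvCnt m) := by
  induction m with
  | zero => norm_num [pvCnt]
  | succ m ih =>
      rw [List.range_succ, List.map_append, List.foldl_append, ih]
      simp only [List.map_cons, List.map_nil, List.foldl_cons, List.foldl_nil]
      unfold pvStep
      by_cases h : (m : Int) % 15 = 7
      · have hd : (1 + 2 * (m : Int)) % 15 = 0 := by omega
        rw [if_pos ((pvCond _).mpr hd)]
        have hc : pvCnt (m + 1) = pvCnt m + 1 := by
          rw [pvCnt_eq, pvCnt_eq]; push_cast; omega
        have h15 : 1 + 2 * (m : Int) = 15 * (2 * pvCnt m + 1) := by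
          rw [pvCnt_eq]; omega
        rw [hc]
        refine Prod.ext ?_ rfl
        push_cast
        linear_combination -h15
      · have hd : ¬ (1 + 2 * (m : Int)) % 15 = 0 := by omega
        rw [if_neg (fun hx => hd ((pvCond _).mp hx))]
        have hc : pvCnt (m + 1) = pvCnt m := by
          rw [pvCnt_eq, pvCnt_eq]; push_cast; omega
        rw [hc]
        refine Prod.ext ?_ rfl
        push_cast
        ring

-- ===== VERDICT (by name: the statement is the Claim_ definition above) =====
theorem sum_of_odd_numbers_spec : Claim_equal_sum_of_odd_numbers := by
  intro n _
  unfold Spec_sum_of_odd_numbers sum_of_odd_numbers sum_of_odd_numbers_alt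
  by_cases hn : n ≤ 0
  · have hr : PySem.List.pyRange 1 (2 * n + 1) 2 = [] := by
      rw [PySem.List.pyRange_of_pos _ _ (by norm_num : (0:Int) < 2)]
      rw [if_neg (by omega)]
      simp
    rw [if_pos hn]
    simp [hr, PySem.Int.mod]
  · rw [if_neg hn]
    have hnn : (0:Int) ≤ n := by omega
    have hr : PySem.List.pyRange 1 (2 * n + 1) 2
        = (List.range n.toNat).map (fun k : Nat => (1:Int) + 2 * (k:Int)) := by
      rw [PySem.List.pyRange_of_pos _ _ (by norm_num : (0:Int) < 2)]
      rw [if_pos (by omega : (1:Int) < 2 * n + 1)]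
      have hcount : ((2 * n + 1 - 1 + 2 - 1) / 2).toNat = n.toNat := by omega
      rw [hcount]
    have hk : pvCnt n.toNat
        = PySem.Int.floordiv (PySem.Int.floordiv (2 * n - 1) 15 + 1) 2 := by
      rw [PySem.Int.floordiv_eq_ediv_of_pos (by norm_num : (0:Int) < 15),
          PySem.Int.floordiv_eq_ediv_of_pos (by norm_num : (0:Int) < 2)]
      unfold pvCnt
      rw [Int.toNat_of_nonneg hnn]
    simp only [hr, pvLoopKey, Int.toNat_of_nonneg hnn, hk]
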